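-- pv_equiv track=rewrite | github.com/choppedpineapple/Advanced_Metagenomics | file_parsing/config_3.3.py | build_tiles
-- ===== SOURCE A (Python) =====
-- MIN_LINKER   = 15
--
-- COMP = str.maketrans("ACGTUNacgtun", "TGCANNtgcann")
--
-- def rc(s): return s.translate(COMP)[::-1]
--
-- def build_tiles(linker):
--     linker = linker.upper().replace("U","T")
--     L = len(linker)
--     r = rc(linker)
--     ks = [k for k in (L, 31, 21, MIN_LINKER) if k <= L]
--     tiles = []
--     for seq, o in ((linker, '+'), (r, '-')):
--         for k in ks:
--             for i in range(0, L-k+1):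
--                 tiles.append((seq[i:i+k], o))
--     tiles.sort(key=lambda x: len(x[0]), reverse=True)
--     return tiles
-- ===== SOURCE B (Python) =====
-- MIN_LINKER = 15
--
-- COMP = str.maketrans("ACGTUNacgtun", "TGCANNtgcann")
--
-- def build_tiles(linker):
--     # B: build the '+' and '-' tile lists separately (each already in length-descending
--     # order) and combine them with a stable two-way merge instead of sorting.
--     linker = linker.upper().replace("U", "T")
--     L = len(linker)
--     r = linker.translate(COMP)[::-1]
--     ks = [k for k in (L, 31, 21, MIN_LINKER) if k <= L]
--     plus = [(linker[i:i+k], '+') for k in ks for i in range(0, L-k+1)]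
--     minus = [(r[i:i+k], '-') for k in ks for i in range(0, L-k+1)]
--     out = []
--     i = j = 0
--     while i < len(plus) and j < len(minus):
--         if len(minus[j][0]) <= len(plus[i][0]):
--             out.append(plus[i]); i += 1
--         else:
--             out.append(minus[j]); j += 1
--     out.extend(plus[i:])
--     out.extend(minus[j:])
--     return out
-- ===== Notes on version B (the rewrite author's own statement) =====
-- stated objective: alternative
-- what changed: Instead of appending all tiles of both strands into one list and stable-sorting it by length descending, B generates the '+' and '-' tile lists separately (each already length-descending because ks is descending) and combines them with a stable two-way merge that drains the '+' list on ties.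
import Mathlib
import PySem

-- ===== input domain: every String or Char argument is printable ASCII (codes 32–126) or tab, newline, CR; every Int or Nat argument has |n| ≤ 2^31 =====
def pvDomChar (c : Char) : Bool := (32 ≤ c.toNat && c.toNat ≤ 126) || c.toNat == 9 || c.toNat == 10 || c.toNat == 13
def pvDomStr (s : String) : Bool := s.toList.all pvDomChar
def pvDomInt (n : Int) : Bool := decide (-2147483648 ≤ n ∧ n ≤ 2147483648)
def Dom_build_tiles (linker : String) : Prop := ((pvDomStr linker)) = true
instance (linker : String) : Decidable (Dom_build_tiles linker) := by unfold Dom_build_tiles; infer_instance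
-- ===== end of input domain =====

-- B replaces A's global stable sort of all tiles by a stable two-way merge of the two
-- per-strand tile lists, which are generated already in length-descending order.

-- ===== PORT A =====
-- COMP = str.maketrans("ACGTUNacgtun", "TGCANNtgcann"); exact: maketrans maps single chars
def pvCompChar (c : Char) : Char :=
  if c = 'A' then 'T' else if c = 'C' then 'G' else if c = 'G' then 'C'
  else if c = 'T' then 'A' else if c = 'U' then 'N' else if c = 'N' then 'N'
  else if c = 'a' then 't' else if c = 'c' then 'g' else if c = 'g' then 'c'
  else if c = 't' then 'a' else if c = 'u' then 'n' else if c = 'n' then 'n'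
  else c

-- rc(s) = s.translate(COMP)[::-1]; exact: translate is the per-char map, [::-1] reverses
def pvRc (s : String) : String := String.ofList ((s.toList.map pvCompChar).reverse)

def build_tiles (linker : String) : List (String × String) :=
  let lnk := PySem.Str.replace (PySem.Str.upper linker) "U" "T"
  let L : Int := PySem.Str.len lnk
  let r := pvRc lnk
  let ks : List Int := [L, 31, 21, 15].filter (fun k => decide (k ≤ L))
  let tiles : List (String × String) :=
    [(lnk, "+"), (r, "-")].foldl (fun tiles so =>
      ks.foldl (fun tiles k =>
        (PySem.List.pyRange 0 (L - k + 1)).foldl (fun tiles i =>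
          tiles ++ [(PySem.Str.slice so.1 (some i) (some (i + k)), so.2)]) tiles) tiles) []
  PySem.List.sorted tiles (fun x => PySem.Str.len x.1) true

-- ===== PORT B =====
-- Source B's index-based merge loop: the indices i, j denote the remaining list suffixes
def pvMerge : List (String × String) → List (String × String) → List (String × String)
  | [], ys => ys
  | x :: xs, [] => x :: xs
  | x :: xs, y :: ys =>
    if PySem.Str.len y.1 ≤ PySem.Str.len x.1 then x :: pvMerge xs (y :: ys)
    else y :: pvMerge (x :: xs) ys

def build_tiles_alt (linker : String) : List (String × String) :=
  let lnk := PySem.Str.replace (PySem.Str.upper linker) "U" "T"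
  let L : Int := PySem.Str.len lnk
  let r := pvRc lnk
  let ks : List Int := [L, 31, 21, 15].filter (fun k => decide (k ≤ L))
  let plus := ks.flatMap (fun k =>
    (PySem.List.pyRange 0 (L - k + 1)).map (fun i => (PySem.Str.slice lnk (some i) (some (i + k)), "+")))
  let minus := ks.flatMap (fun k =>
    (PySem.List.pyRange 0 (L - k + 1)).map (fun i => (PySem.Str.slice r (some i) (some (i + k)), "-")))
  pvMerge plus minus

-- ===== PRECONDITION & SPEC =====
def Spec_build_tiles (linker : String) (out : List (String × String)) : Prop := out = build_tiles_alt linker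
instance (linker : String) (out : List (String × String)) : Decidable (Spec_build_tiles linker out) := by unfold Spec_build_tiles; infer_instance

-- ===== CLAIM (what is proved, stated in full; the proofs are below) =====
def Claim_equal_build_tiles : Prop := ∀ (linker : String), Dom_build_tiles linker → Spec_build_tiles linker (build_tiles linker)

-- ===== LEMMAS AND PROOFS =====

theorem pv_insertBy_cons (bef : (String × String) → (String × String) → Bool)
    (x y : String × String) (ys : List (String × String)) :
    PySem.List.insertBy bef x (y :: ys) =
      if bef x y then x :: y :: ys else y :: PySem.List.insertBy bef x ys := rfl

theorem pv_merge_nil_left (ys : List (String × String)) : pvMerge [] ys = ys := by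
  cases ys <;> simp [pvMerge]

theorem pv_merge_nil_right (xs : List (String × String)) : pvMerge xs [] = xs := by
  cases xs <;> simp [pvMerge]

-- inserting an element no longer than anything in zs into the merge appends it to zs
theorem pv_insertBy_merge (y : String × String) :
    ∀ (xs zs : List (String × String)),
      (∀ z ∈ zs, PySem.Str.len y.1 ≤ PySem.Str.len z.1) →
      PySem.List.insertBy (fun a b => decide (PySem.Str.len b.1 < PySem.Str.len a.1)) y (pvMerge xs zs)
        = pvMerge xs (zs ++ [y]) := by
  intro xs
  induction xs with
  | nil =>
    intro zs hz
    rw [pv_merge_nil_left, pv_merge_nil_left]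
    exact PySem.List.insertBy_of_forall_not_before _ y zs (fun z hzm => by
      simp only [decide_eq_false_iff_not, not_lt]
      exact hz z hzm)
  | cons x xs ihx =>
    intro zs
    induction zs with
    | nil =>
      intro _
      rw [pv_merge_nil_right, pv_insertBy_cons, List.nil_append]
      by_cases h : PySem.Str.len y.1 ≤ PySem.Str.len x.1
      · rw [if_neg (by simp only [decide_eq_true_eq, not_lt]; exact h)]
        have hx := ihx [] (by intro z hzm; exact absurd hzm (List.not_mem_nil))
        rw [pv_merge_nil_right, List.nil_append] at hx
        rw [hx]
        simp only [pvMerge, if_pos h]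
      · rw [if_pos (by simp only [decide_eq_true_eq]; exact not_le.mp h)]
        simp only [pvMerge, if_neg h]
    | cons z zs ihz =>
      intro hz
      have hyz : PySem.Str.len y.1 ≤ PySem.Str.len z.1 := hz z List.mem_cons_self
      by_cases hzx : PySem.Str.len z.1 ≤ PySem.Str.len x.1
      · have e1 : pvMerge (x :: xs) (z :: zs) = x :: pvMerge xs (z :: zs) := by
          simp only [pvMerge]; rw [if_pos hzx]
        have e2 : pvMerge (x :: xs) ((z :: zs) ++ [y]) = x :: pvMerge xs ((z :: zs) ++ [y]) := by
          simp only [List.cons_append, pvMerge]; rw [if_pos hzx]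
        rw [e1, pv_insertBy_cons,
          if_neg (by simp only [decide_eq_true_eq, not_lt]; exact le_trans hyz hzx),
          ihx (z :: zs) hz, e2]
      · have e1 : pvMerge (x :: xs) (z :: zs) = z :: pvMerge (x :: xs) zs := by
          simp only [pvMerge]; rw [if_neg hzx]
        have e2 : pvMerge (x :: xs) ((z :: zs) ++ [y]) = z :: pvMerge (x :: xs) (zs ++ [y]) := by
          simp only [List.cons_append, pvMerge]; rw [if_neg hzx]
        rw [e1, pv_insertBy_cons,
          if_neg (by simp only [decide_eq_true_eq, not_lt]; exact hyz),
          ihz (fun w hw => hz w (List.mem_cons_of_mem _ hw)), e2]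

theorem pv_foldl_insert_merge :
    ∀ (zs xs : List (String × String)),
      zs.Pairwise (fun a b => PySem.Str.len b.1 ≤ PySem.Str.len a.1) →
      zs.foldl (fun acc z =>
          PySem.List.insertBy (fun a b => decide (PySem.Str.len b.1 < PySem.Str.len a.1)) z acc) xs
        = pvMerge xs zs := by
  intro zs
  induction zs using List.reverseRecOn with
  | nil => intro xs _; exact (pv_merge_nil_right xs).symm
  | append_singleton zs y ih =>
    intro xs h
    rw [List.pairwise_append] at h
    obtain ⟨h1, _, h3⟩ := h
    rw [List.foldl_append]
    simp only [List.foldl_cons, List.foldl_nil]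
    rw [ih xs h1]
    exact pv_insertBy_merge y xs zs (fun z hzm => h3 z hzm y List.mem_cons_self)

-- the stable reverse sort of two length-descending lists is their stable merge
theorem pv_sorted_append_eq_merge (xs ys : List (String × String))
    (hx : xs.Pairwise (fun a b => PySem.Str.len b.1 ≤ PySem.Str.len a.1))
    (hy : ys.Pairwise (fun a b => PySem.Str.len b.1 ≤ PySem.Str.len a.1)) :
    PySem.List.sorted (xs ++ ys) (fun x => PySem.Str.len x.1) true = pvMerge xs ys := by
  rw [PySem.List.sorted_rev_eq_foldl_insertBy, List.foldl_append]
  have hxs : List.foldl (fun acc x =>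
      PySem.List.insertBy (fun a b => decide (PySem.Str.len b.1 < PySem.Str.len a.1)) x acc) [] xs = xs := by
    rw [← PySem.List.sorted_rev_eq_foldl_insertBy]
    exact PySem.List.sorted_rev_eq_self_of_pairwise xs _ hx
  rw [hxs]
  exact pv_foldl_insert_merge ys xs hy

-- A's nested append loops build exactly the flatMap comprehension
theorem pv_foldl_ks (s o : String) (L : Int) (ks : List Int) :
    ∀ acc : List (String × String),
      ks.foldl (fun tiles k =>
        (PySem.List.pyRange 0 (L - k + 1)).foldl (fun tiles i =>
          tiles ++ [(PySem.Str.slice s (some i) (some (i + k)), o)]) tiles) acc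
      = acc ++ ks.flatMap (fun k =>
          (PySem.List.pyRange 0 (L - k + 1)).map
            (fun i => (PySem.Str.slice s (some i) (some (i + k)), o))) := by
  induction ks with
  | nil => intro acc; simp
  | cons k ks ih =>
    intro acc
    simp only [List.foldl_cons, List.flatMap_cons]
    rw [PySem.List.foldl_append_singleton_eq_map, ih, List.append_assoc]

theorem pv_len_slice (s : String) (L k i : Int) (hL : L = PySem.Str.len s)
    (hk0 : 0 ≤ k) (_hkL : k ≤ L) (hi : 0 ≤ i) (hik : i < L - k + 1) :
    PySem.Str.len (PySem.Str.slice s (some i) (some (i + k))) = k := by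
  have hlen : L = (s.toList.length : Int) := by rw [hL, PySem.Str.len_eq]
  rw [PySem.Str.len_eq, PySem.Str.toList_slice, PySem.Chars.slice_eq_listSlice]
  rw [PySem.List.slice_toNat s.toList hi (by omega)]
  simp only [List.length_take, List.length_drop]
  omega

theorem pv_tiles_pairwise (s o : String) (L : Int) (hL : L = PySem.Str.len s) :
    ∀ ks : List Int, ks.Pairwise (fun a b => b ≤ a) → (∀ k ∈ ks, 0 ≤ k ∧ k ≤ L) →
      (ks.flatMap (fun k =>
          (PySem.List.pyRange 0 (L - k + 1)).map
            (fun i => (PySem.Str.slice s (some i) (some (i + k)), o)))).Pairwise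
        (fun a b => PySem.Str.len b.1 ≤ PySem.Str.len a.1) := by
  have hmem : ∀ k, 0 ≤ k → k ≤ L →
      ∀ x ∈ (PySem.List.pyRange 0 (L - k + 1)).map
          (fun i => (PySem.Str.slice s (some i) (some (i + k)), o)),
        PySem.Str.len x.1 = k := by
    intro k hk0 hkL x hx
    rw [List.mem_map] at hx
    obtain ⟨i, hi, rfl⟩ := hx
    rw [PySem.List.mem_pyRange_one] at hi
    exact pv_len_slice s L k i hL hk0 hkL hi.1 hi.2
  intro ks
  induction ks with
  | nil => intro _ _; simp
  | cons k ks ih =>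
    intro hpw hdom
    rw [List.pairwise_cons] at hpw
    simp only [List.flatMap_cons]
    rw [List.pairwise_append]
    have hk := hdom k (by simp)
    refine ⟨?_, ih hpw.2 (fun k' hk' => hdom k' (by simp [hk'])), ?_⟩
    · apply List.pairwise_of_forall_mem_list
      intro a ha b hb
      rw [hmem k hk.1 hk.2 a ha, hmem k hk.1 hk.2 b hb]
    · intro a ha b hb
      rw [List.mem_flatMap] at hb
      obtain ⟨k', hk', hbk'⟩ := hb
      have hk'd := hdom k' (by simp [hk'])
      rw [hmem k hk.1 hk.2 a ha, hmem k' hk'd.1 hk'd.2 b hbk']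
      exact hpw.1 k' hk'

theorem pv_ks_pairwise (L : Int) :
    ([L, 31, 21, 15].filter (fun k => decide (k ≤ L))).Pairwise (fun a b : Int => b ≤ a) := by
  by_cases h31 : (31:Int) ≤ L <;> by_cases h21 : (21:Int) ≤ L <;> by_cases h15 : (15:Int) ≤ L <;>
    simp [List.filter, h31, h21, h15, List.pairwise_cons] <;> omega

theorem pv_ks_mem (L : Int) (hL : 0 ≤ L) :
    ∀ k ∈ [L, 31, 21, 15].filter (fun k => decide (k ≤ L)), 0 ≤ k ∧ k ≤ L := by
  intro k hk
  rw [List.mem_filter] at hk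
  have h2 : k ≤ L := by simpa using hk.2
  have h1 := hk.1
  simp only [List.mem_cons] at h1
  refine ⟨?_, h2⟩
  rcases h1 with rfl | rfl | rfl | h1
  · exact hL
  · norm_num
  · norm_num
  · simp at h1; omega

theorem pv_main (lnk r : String) (hr : PySem.Str.len r = PySem.Str.len lnk) :
    PySem.List.sorted
      ([(lnk, "+"), (r, "-")].foldl (fun tiles so =>
        ([PySem.Str.len lnk, 31, 21, 15].filter (fun k => decide (k ≤ PySem.Str.len lnk))).foldl
          (fun tiles k =>
            (PySem.List.pyRange 0 (PySem.Str.len lnk - k + 1)).foldl (fun tiles i =>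
              tiles ++ [(PySem.Str.slice so.1 (some i) (some (i + k)), so.2)]) tiles) tiles) [])
      (fun x => PySem.Str.len x.1) true
    = pvMerge
      (([PySem.Str.len lnk, 31, 21, 15].filter (fun k => decide (k ≤ PySem.Str.len lnk))).flatMap
        (fun k => (PySem.List.pyRange 0 (PySem.Str.len lnk - k + 1)).map
          (fun i => (PySem.Str.slice lnk (some i) (some (i + k)), "+"))))
      (([PySem.Str.len lnk, 31, 21, 15].filter (fun k => decide (k ≤ PySem.Str.len lnk))).flatMap
        (fun k => (PySem.List.pyRange 0 (PySem.Str.len lnk - k + 1)).map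
          (fun i => (PySem.Str.slice r (some i) (some (i + k)), "-")))) := by
  have hL0 : 0 ≤ PySem.Str.len lnk := by
    rw [PySem.Str.len_eq]; exact Int.natCast_nonneg _
  simp only [List.foldl_cons, List.foldl_nil]
  rw [pv_foldl_ks, pv_foldl_ks, List.nil_append]
  exact pv_sorted_append_eq_merge _ _
    (pv_tiles_pairwise lnk "+" _ rfl _ (pv_ks_pairwise _) (pv_ks_mem _ hL0))
    (pv_tiles_pairwise r "-" _ hr.symm _ (pv_ks_pairwise _) (pv_ks_mem _ hL0))

-- ===== VERDICT (by name: the statement is the Claim_ definition above) =====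
theorem build_tiles_spec : Claim_equal_build_tiles := by
  intro linker _
  unfold Spec_build_tiles build_tiles build_tiles_alt
  exact pv_main (PySem.Str.replace (PySem.Str.upper linker) "U" "T")
    (pvRc (PySem.Str.replace (PySem.Str.upper linker) "U" "T"))
    (by rw [PySem.Str.len_eq, PySem.Str.len_eq, pvRc]; simp)
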